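-- pv_equiv track=rewrite | github.com/poak79/Programmers-practice | 프로그래머스/0/181926. 수 조작하기 1/수 조작하기 1.py | solution
-- ===== SOURCE A (Python) =====
-- def solution(n, con):
--     cont = list(con)
--     for s in cont:
--         if s == "w":
--             n += 1
--         elif s == "s":
--             n -= 1
--         elif s == "d":
--             n += 10
--         elif s == "a":
--             n -= 10
--
--     return n
-- ===== SOURCE B (Python) =====
-- def solution(n, con):
--     return n + con.count("w") - con.count("s") + 10 * con.count("d") - 10 * con.count("a")
-- ===== Notes on version B (the rewrite author's own statement) =====
-- stated objective: idiomatic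
-- what changed: Replaces the per-character branch-ladder accumulation loop by a closed-form expression combining the four per-symbol counts (str.count) with their deltas.
import Mathlib
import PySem

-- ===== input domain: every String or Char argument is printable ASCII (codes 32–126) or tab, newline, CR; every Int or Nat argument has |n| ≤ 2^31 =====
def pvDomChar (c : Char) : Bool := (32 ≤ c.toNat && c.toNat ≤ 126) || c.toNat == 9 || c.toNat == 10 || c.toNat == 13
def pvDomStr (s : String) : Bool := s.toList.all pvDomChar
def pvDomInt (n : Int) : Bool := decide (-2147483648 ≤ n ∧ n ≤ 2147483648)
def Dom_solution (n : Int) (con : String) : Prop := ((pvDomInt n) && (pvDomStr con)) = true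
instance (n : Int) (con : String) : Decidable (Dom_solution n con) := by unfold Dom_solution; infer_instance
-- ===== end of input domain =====

-- B replaces A's per-character branch-ladder loop by a closed-form combination of the four per-symbol counts (idiomatic; same cost).


-- ===== PORT A =====
-- Port of A: branch-ladder accumulation over the characters of con.
def solution (n : Int) (con : String) : Int :=
  con.toList.foldl (fun n s =>
    if s = 'w' then n + 1
    else if s = 's' then n - 1
    else if s = 'd' then n + 10
    else if s = 'a' then n - 10
    else n) n

-- ===== PORT B =====
-- Port of B: closed form from the four per-symbol counts.
def solution_alt (n : Int) (con : String) : Int :=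
  n + (PySem.Str.count con "w" : Int) - (PySem.Str.count con "s" : Int)
    + 10 * (PySem.Str.count con "d" : Int) - 10 * (PySem.Str.count con "a" : Int)

-- ===== PRECONDITION & SPEC =====
def Spec_solution (n : Int) (con : String) (out : Int) : Prop := out = solution_alt n con
instance (n : Int) (con : String) (out : Int) : Decidable (Spec_solution n con out) := by unfold Spec_solution; infer_instance

-- ===== CLAIM (what is proved, stated in full; the proofs are below) =====
def Claim_equal_solution : Prop := ∀ (n : Int) (con : String), Dom_solution n con → Spec_solution n con (solution n con)

-- ===== LEMMAS AND PROOFS =====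

-- ===== VERDICT (by name: the statement is the Claim_ definition above) =====
lemma go_single (c : Char) (fuel : Nat) (l : List Char) (acc : Nat) (h : l.length ≤ fuel) :
    PySem.Chars.count.go [c] fuel l acc = acc + l.count c := by
  induction fuel generalizing l acc with
  | zero =>
    have : l = [] := List.eq_nil_of_length_eq_zero (Nat.le_zero.1 h)
    subst this; simp [PySem.Chars.count.go]
  | succ fuel ih =>
    cases l with
    | nil => simp [PySem.Chars.count.go]
    | cons x t =>
      simp only [List.length_cons, Nat.add_le_add_iff_right] at h
      by_cases hx : x = c
      · subst hx
        rw [show PySem.Chars.count.go [x] (fuel+1) (x::t) acc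
              = PySem.Chars.count.go [x] fuel (List.drop 1 (x::t)) (acc+1) from by
            simp [PySem.Chars.count.go, List.isPrefixOf]]
        rw [List.drop_one, List.tail_cons, ih t (acc+1) h]
        simp; omega
      · rw [show PySem.Chars.count.go [c] (fuel+1) (x::t) acc
              = PySem.Chars.count.go [c] fuel t acc from by
            simp [PySem.Chars.count.go, List.isPrefixOf, Ne.symm hx]]
        rw [ih t acc h]
        simp [hx]

lemma count_single (cs : List Char) (c : Char) :
    PySem.Chars.count cs [c] = cs.count c := by
  simp [PySem.Chars.count, go_single c cs.length cs 0 le_rfl]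

lemma foldl_closed (cs : List Char) (n : Int) :
    cs.foldl (fun n s =>
      if s = 'w' then n + 1
      else if s = 's' then n - 1
      else if s = 'd' then n + 10
      else if s = 'a' then n - 10
      else n) n
    = n + (cs.count 'w' : Int) - (cs.count 's' : Int)
        + 10 * (cs.count 'd' : Int) - 10 * (cs.count 'a' : Int) := by
  induction cs generalizing n with
  | nil => simp
  | cons c cs ih =>
    simp only [List.foldl_cons, List.count_cons, ih]
    by_cases h1 : c = 'w' <;> by_cases h2 : c = 's' <;> by_cases h3 : c = 'd' <;>
      by_cases h4 : c = 'a' <;> simp_all <;> ring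

theorem solution_spec : Claim_equal_solution := by
  intro n con _
  unfold Spec_solution solution solution_alt
  simp only [PySem.Str.count_eq]
  rw [foldl_closed]
  simp [count_single]
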